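-- pv_equiv track=rewrite | github.com/NineMeen/Cisco-Web-application-Network-Automation | app.py | generate_wildcard_mask_dropdown
-- ===== SOURCE A (Python) =====
-- def generate_wildcard_mask_dropdown(name, id, mask=None):
--     options = [
--         ('0.255.255.255', '/8'),
--         ('0.127.255.255', '/9'),
--         ('0.63.255.255', '/10'),
--         ('0.31.255.255', '/11'),
--         ('0.15.255.255', '/12'),
--         ('0.7.255.255', '/13'),
--         ('0.3.255.255', '/14'),
--         ('0.1.255.255', '/15'),
--         ('0.0.255.255', '/16'),
--         ('0.0.127.255', '/17'),
--         ('0.0.63.255', '/18'),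
--         ('0.0.31.255', '/19'),
--         ('0.0.15.255', '/20'),
--         ('0.0.7.255', '/21'),
--         ('0.0.3.255', '/22'),
--         ('0.0.1.255', '/23'),
--         ('0.0.0.255', '/24'),
--         ('0.0.0.127', '/25'),
--         ('0.0.0.63', '/26'),
--         ('0.0.0.31', '/27'),
--         ('0.0.0.15', '/28'),
--         ('0.0.0.7', '/29'),
--         ('0.0.0.3', '/30'),
--         ('0.0.0.1', '/31'),
--         ('0.0.0.0', '/32')
--     ]
--     select_html = f'<select name="{name}" id="{id}" class="form-select" required>'
--     for value, text in options:
--         selected = ' selected' if mask and mask == value else ''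
--         select_html += f'<option value="{value}"{selected}>{value} {text}</option>'
--     select_html += '</select>'
--     return select_html
-- ===== SOURCE B (Python) =====
-- def generate_wildcard_mask_dropdown(name, id, mask=None):
--     parts = [f'<select name="{name}" id="{id}" class="form-select" required>']
--     for prefix in range(8, 33):
--         wild = (1 << (32 - prefix)) - 1
--         value = f'{(wild >> 24) & 255}.{(wild >> 16) & 255}.{(wild >> 8) & 255}.{wild & 255}'
--         selected = ' selected' if mask == value else ''
--         parts.append(f'<option value="{value}"{selected}>{value} /{prefix}</option>')
--     parts.append('</select>')
--     return ''.join(parts)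
-- ===== Notes on version B (the rewrite author's own statement) =====
-- stated objective: simpler
-- what changed: Replaces the hardcoded 25-row wildcard-mask table with arithmetic derivation: loop prefix 8..32, compute wild = (1 << (32-prefix)) - 1, format the four octets and '/prefix' text, and join collected parts instead of string accumulation.
import Mathlib
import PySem

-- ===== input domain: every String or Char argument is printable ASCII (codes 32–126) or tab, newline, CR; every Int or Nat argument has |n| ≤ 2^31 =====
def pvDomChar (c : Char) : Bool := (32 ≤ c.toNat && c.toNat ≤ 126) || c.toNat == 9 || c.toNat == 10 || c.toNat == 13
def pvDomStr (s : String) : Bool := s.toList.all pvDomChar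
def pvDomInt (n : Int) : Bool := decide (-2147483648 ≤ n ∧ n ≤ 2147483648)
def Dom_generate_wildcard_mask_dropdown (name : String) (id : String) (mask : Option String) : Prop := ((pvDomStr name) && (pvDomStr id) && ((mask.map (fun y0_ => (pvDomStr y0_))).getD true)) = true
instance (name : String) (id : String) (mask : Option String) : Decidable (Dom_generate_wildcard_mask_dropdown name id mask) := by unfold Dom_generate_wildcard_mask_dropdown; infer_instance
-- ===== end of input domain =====

-- B replaces A's hardcoded 25-row wildcard-mask table by computing each mask arithmetically
-- from the prefix length ((1 << (32-prefix)) - 1, split into dotted octets) and joining the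
-- collected parts; objective: simpler (no table to maintain), same output proved equal.


-- ===== PORT A =====
-- A's literal table of (wildcard value, "/prefix" text) rows
def wmOptions : List (String × String) := [
    ("0.255.255.255", "/8"),
    ("0.127.255.255", "/9"),
    ("0.63.255.255", "/10"),
    ("0.31.255.255", "/11"),
    ("0.15.255.255", "/12"),
    ("0.7.255.255", "/13"),
    ("0.3.255.255", "/14"),
    ("0.1.255.255", "/15"),
    ("0.0.255.255", "/16"),
    ("0.0.127.255", "/17"),
    ("0.0.63.255", "/18"),
    ("0.0.31.255", "/19"),
    ("0.0.15.255", "/20"),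
    ("0.0.7.255", "/21"),
    ("0.0.3.255", "/22"),
    ("0.0.1.255", "/23"),
    ("0.0.0.255", "/24"),
    ("0.0.0.127", "/25"),
    ("0.0.0.63", "/26"),
    ("0.0.0.31", "/27"),
    ("0.0.0.15", "/28"),
    ("0.0.0.7", "/29"),
    ("0.0.0.3", "/30"),
    ("0.0.0.1", "/31"),
    ("0.0.0.0", "/32")]

def generate_wildcard_mask_dropdown (name : String) (id : String) (mask : Option String) : String :=
  let select_html := "<select name=\"" ++ name ++ "\" id=\"" ++ id ++ "\" class=\"form-select\" required>"
  let select_html := wmOptions.foldl (fun acc vt =>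
    -- 'mask and mask == value': None (and the empty string) is falsy in Python
    let selected := if (match mask with | none => false | some s => s != "" && s == vt.1) then " selected" else ""
    acc ++ ("<option value=\"" ++ vt.1 ++ "\"" ++ selected ++ ">" ++ vt.1 ++ " " ++ vt.2 ++ "</option>")) select_html
  select_html ++ "</select>"

-- ===== PORT B =====
-- one loop iteration of B: wild = (1 << (32-prefix)) - 1, dotted octets, the <option> line
def mkOption (mask : Option String) (pfx : Int) : String :=
  let wild : Int := (1 <<< (32 - pfx).toNat) - 1
  let value := PySem.Int.toStr (PySem.Int.band (wild >>> 24) 255) ++ "." ++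
               PySem.Int.toStr (PySem.Int.band (wild >>> 16) 255) ++ "." ++
               PySem.Int.toStr (PySem.Int.band (wild >>> 8) 255) ++ "." ++
               PySem.Int.toStr (PySem.Int.band wild 255)
  let selected := if mask == some value then " selected" else ""
  "<option value=\"" ++ value ++ "\"" ++ selected ++ ">" ++ value ++ " /" ++ PySem.Int.toStr pfx ++ "</option>"

def generate_wildcard_mask_dropdown_alt (name : String) (id : String) (mask : Option String) : String :=
  let parts := ["<select name=\"" ++ name ++ "\" id=\"" ++ id ++ "\" class=\"form-select\" required>"]
  let parts := parts ++ (PySem.List.pyRange 8 33 1).map (mkOption mask)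
  let parts := parts ++ ["</select>"]
  PySem.Str.join "" parts

-- ===== PRECONDITION & SPEC =====
def Spec_generate_wildcard_mask_dropdown (name : String) (id : String) (mask : Option String) (out : String) : Prop := out = generate_wildcard_mask_dropdown_alt name id mask
instance (name : String) (id : String) (mask : Option String) (out : String) : Decidable (Spec_generate_wildcard_mask_dropdown name id mask out) := by unfold Spec_generate_wildcard_mask_dropdown; infer_instance

-- ===== CLAIM (what is proved, stated in full; the proofs are below) =====
def Claim_equal_generate_wildcard_mask_dropdown : Prop := ∀ (name : String) (id : String) (mask : Option String), Dom_generate_wildcard_mask_dropdown name id mask → Spec_generate_wildcard_mask_dropdown name id mask (generate_wildcard_mask_dropdown name id mask)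

-- ===== LEMMAS AND PROOFS =====

-- B's computed option line, rewritten with its (closed-term) value as a literal
theorem mkOption_eq (mask : Option String) (p : Int) (v t : String)
    (hv : PySem.Int.toStr (PySem.Int.band (((1 <<< (32 - p).toNat : Int) - 1) >>> 24) 255) ++ "." ++
          PySem.Int.toStr (PySem.Int.band (((1 <<< (32 - p).toNat : Int) - 1) >>> 16) 255) ++ "." ++
          PySem.Int.toStr (PySem.Int.band (((1 <<< (32 - p).toNat : Int) - 1) >>> 8) 255) ++ "." ++
          PySem.Int.toStr (PySem.Int.band ((1 <<< (32 - p).toNat : Int) - 1) 255) = v)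
    (ht : PySem.Int.toStr p = t) :
    mkOption mask p = "<option value=\"" ++ v ++ "\"" ++
      (if mask == some v then " selected" else "") ++
      ">" ++ v ++ " /" ++ t ++ "</option>" := by
  simp only [mkOption, hv, ht]

-- A's truthy test 'mask and mask == value' agrees with B's 'mask == value' for nonempty value
theorem sel_eq (mask : Option String) (v : String) (hv : v ≠ "") :
    (if (match mask with | none => false | some s => s != "" && s == v) = true then (" selected" : String) else "") =
    (if mask == some v then " selected" else "") := by
  cases mask with
  | none => simp
  | some s =>
    by_cases h : s = v
    · subst h; simp [hv]
    · simp [h, bne_iff_ne]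

theorem toList_selected (c : Prop) [Decidable c] :
    (if c then (" selected" : String) else "").toList =
    if c then [' ','s','e','l','e','c','t','e','d'] else [] := by
  split <;> rfl

-- ===== VERDICT (by name: the statement is the Claim_ definition above) =====
set_option maxRecDepth 20000 in
theorem generate_wildcard_mask_dropdown_spec : Claim_equal_generate_wildcard_mask_dropdown := by
  intro name id mask _
  unfold Spec_generate_wildcard_mask_dropdown
  unfold generate_wildcard_mask_dropdown generate_wildcard_mask_dropdown_alt
  have hr : PySem.List.pyRange 8 33 1 = [8,9,10,11,12,13,14,15,16,17,18,19,20,21,22,23,24,25,26,27,28,29,30,31,32] := by decide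
  rw [hr]
  have hv8 := mkOption_eq mask 8 "0.255.255.255" "8" (by decide) (by decide)
  have hs8 := sel_eq mask "0.255.255.255" (by decide)
  have hv9 := mkOption_eq mask 9 "0.127.255.255" "9" (by decide) (by decide)
  have hs9 := sel_eq mask "0.127.255.255" (by decide)
  have hv10 := mkOption_eq mask 10 "0.63.255.255" "10" (by decide) (by decide)
  have hs10 := sel_eq mask "0.63.255.255" (by decide)
  have hv11 := mkOption_eq mask 11 "0.31.255.255" "11" (by decide) (by decide)
  have hs11 := sel_eq mask "0.31.255.255" (by decide)
  have hv12 := mkOption_eq mask 12 "0.15.255.255" "12" (by decide) (by decide)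
  have hs12 := sel_eq mask "0.15.255.255" (by decide)
  have hv13 := mkOption_eq mask 13 "0.7.255.255" "13" (by decide) (by decide)
  have hs13 := sel_eq mask "0.7.255.255" (by decide)
  have hv14 := mkOption_eq mask 14 "0.3.255.255" "14" (by decide) (by decide)
  have hs14 := sel_eq mask "0.3.255.255" (by decide)
  have hv15 := mkOption_eq mask 15 "0.1.255.255" "15" (by decide) (by decide)
  have hs15 := sel_eq mask "0.1.255.255" (by decide)
  have hv16 := mkOption_eq mask 16 "0.0.255.255" "16" (by decide) (by decide)
  have hs16 := sel_eq mask "0.0.255.255" (by decide)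
  have hv17 := mkOption_eq mask 17 "0.0.127.255" "17" (by decide) (by decide)
  have hs17 := sel_eq mask "0.0.127.255" (by decide)
  have hv18 := mkOption_eq mask 18 "0.0.63.255" "18" (by decide) (by decide)
  have hs18 := sel_eq mask "0.0.63.255" (by decide)
  have hv19 := mkOption_eq mask 19 "0.0.31.255" "19" (by decide) (by decide)
  have hs19 := sel_eq mask "0.0.31.255" (by decide)
  have hv20 := mkOption_eq mask 20 "0.0.15.255" "20" (by decide) (by decide)
  have hs20 := sel_eq mask "0.0.15.255" (by decide)
  have hv21 := mkOption_eq mask 21 "0.0.7.255" "21" (by decide) (by decide)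
  have hs21 := sel_eq mask "0.0.7.255" (by decide)
  have hv22 := mkOption_eq mask 22 "0.0.3.255" "22" (by decide) (by decide)
  have hs22 := sel_eq mask "0.0.3.255" (by decide)
  have hv23 := mkOption_eq mask 23 "0.0.1.255" "23" (by decide) (by decide)
  have hs23 := sel_eq mask "0.0.1.255" (by decide)
  have hv24 := mkOption_eq mask 24 "0.0.0.255" "24" (by decide) (by decide)
  have hs24 := sel_eq mask "0.0.0.255" (by decide)
  have hv25 := mkOption_eq mask 25 "0.0.0.127" "25" (by decide) (by decide)
  have hs25 := sel_eq mask "0.0.0.127" (by decide)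
  have hv26 := mkOption_eq mask 26 "0.0.0.63" "26" (by decide) (by decide)
  have hs26 := sel_eq mask "0.0.0.63" (by decide)
  have hv27 := mkOption_eq mask 27 "0.0.0.31" "27" (by decide) (by decide)
  have hs27 := sel_eq mask "0.0.0.31" (by decide)
  have hv28 := mkOption_eq mask 28 "0.0.0.15" "28" (by decide) (by decide)
  have hs28 := sel_eq mask "0.0.0.15" (by decide)
  have hv29 := mkOption_eq mask 29 "0.0.0.7" "29" (by decide) (by decide)
  have hs29 := sel_eq mask "0.0.0.7" (by decide)
  have hv30 := mkOption_eq mask 30 "0.0.0.3" "30" (by decide) (by decide)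
  have hs30 := sel_eq mask "0.0.0.3" (by decide)
  have hv31 := mkOption_eq mask 31 "0.0.0.1" "31" (by decide) (by decide)
  have hs31 := sel_eq mask "0.0.0.1" (by decide)
  have hv32 := mkOption_eq mask 32 "0.0.0.0" "32" (by decide) (by decide)
  have hs32 := sel_eq mask "0.0.0.0" (by decide)
  simp only [wmOptions, List.foldl, List.map, hv8, hs8, hv9, hs9, hv10, hs10, hv11, hs11, hv12, hs12, hv13, hs13, hv14, hs14, hv15, hs15, hv16, hs16, hv17, hs17, hv18, hs18, hv19, hs19, hv20, hs20, hv21, hs21, hv22, hs22, hv23, hs23, hv24, hs24, hv25, hs25, hv26, hs26, hv27, hs27, hv28, hs28, hv29, hs29, hv30, hs30, hv31, hs31, hv32, hs32]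
  rw [← String.toList_inj]
  simp [PySem.Str.join, PySem.Chars.join_singleton, PySem.Chars.join_cons_cons, String.toList_append, toList_selected]
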